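-- pv_equiv track=rewrite | github.com/mlevogiannis/demos-voting | demos/demos_utils/settings.py | _datetime_py2js
-- ===== SOURCE A (Python) =====
-- def _datetime_py2js(datetime_format):
--
-- 	conv_dict = {
-- 		'%d': 'DD',
-- 		'%m': 'MM',
-- 		'%y': 'YY',
-- 		'%Y': 'YYYY',
-- 		'%H': 'HH',
-- 		'%M': 'mm',
-- 		'%S': 'ss',
-- 	}
--
-- 	for py, js in conv_dict.items():
-- 		datetime_format = datetime_format.replace(py, js)
--
-- 	return datetime_format
-- ===== SOURCE B (Python) =====
-- def _datetime_py2js(datetime_format):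
--
-- 	conv_dict = {
-- 		'd': 'DD',
-- 		'm': 'MM',
-- 		'y': 'YY',
-- 		'Y': 'YYYY',
-- 		'H': 'HH',
-- 		'M': 'mm',
-- 		'S': 'ss',
-- 	}
--
-- 	out = []
-- 	i = 0
-- 	n = len(datetime_format)
-- 	while i < n:
-- 		ch = datetime_format[i]
-- 		if ch == '%' and i + 1 < n and datetime_format[i + 1] in conv_dict:
-- 			out.append(conv_dict[datetime_format[i + 1]])
-- 			i += 2
-- 		else:
-- 			out.append(ch)
-- 			i += 1
-- 	return ''.join(out)
-- ===== Notes on version B (the rewrite author's own statement) =====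
-- stated objective: alternative
-- what changed: Replaced seven sequential str.replace passes by one left-to-right tokenizing scan that maps each %X token exactly once.
-- intended difference: On inputs containing the substring '%%m' or '%%y', A's later replace passes re-match the '%M'/'%Y' that an earlier pass just created (e.g. A('%%m') = 'mmM', A('%%y') = 'YYYYY'), while B scans each input token once and returns '%MM' / '%YY', which is the intended token-by-token conversion. — e.g. on _datetime_py2js("%%m"): A returns "mmM", B returns "%MM"
import Mathlib
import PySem

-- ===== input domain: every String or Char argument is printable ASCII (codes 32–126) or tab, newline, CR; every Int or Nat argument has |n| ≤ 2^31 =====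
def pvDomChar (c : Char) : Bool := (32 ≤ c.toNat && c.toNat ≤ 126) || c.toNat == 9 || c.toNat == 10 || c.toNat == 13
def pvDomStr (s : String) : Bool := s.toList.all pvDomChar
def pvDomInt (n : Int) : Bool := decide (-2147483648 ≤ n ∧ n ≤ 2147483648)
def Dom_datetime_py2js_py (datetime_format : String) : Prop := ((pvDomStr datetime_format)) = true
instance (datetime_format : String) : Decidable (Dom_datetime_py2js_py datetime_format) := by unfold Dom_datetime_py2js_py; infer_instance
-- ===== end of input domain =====

-- B does one tokenizing scan instead of A's seven sequential replace passes; on inputs containing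
-- '%%m'/'%%y' A's passes cascade (a pass re-matches a '%M'/'%Y' a previous pass created) and B
-- instead converts each token of the input once (see D_ below).

-- ===== PORT A =====
def datetime_py2js_py (datetime_format : String) : String :=
  -- conv_dict in Python insertion order; the for-loop over .items() is the foldl
  let conv_dict : List (String × String) :=
    [("%d", "DD"), ("%m", "MM"), ("%y", "YY"), ("%Y", "YYYY"),
     ("%H", "HH"), ("%M", "mm"), ("%S", "ss")]
  conv_dict.foldl (fun acc pj => PySem.Str.replace acc pj.1 pj.2) datetime_format

-- ===== PORT B =====
-- the dict of Source B, keyed by the character after '%'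
def pvConvDict : List (Char × List Char) :=
  [('d', ['D','D']), ('m', ['M','M']), ('y', ['Y','Y']), ('Y', ['Y','Y','Y','Y']),
   ('H', ['H','H']), ('M', ['m','m']), ('S', ['s','s'])]

-- Source B's 'key in conv_dict' / 'conv_dict[key]' lookup
def pvAssoc (D : List (Char × List Char)) (y : Char) : Option (List Char) :=
  match D with
  | [] => none
  | (k, v) :: rest => if y = k then some v else pvAssoc rest y

-- Source B's while loop: at '%' with a known next char emit the mapped value and advance 2, else copy one char
def pvScan (D : List (Char × List Char)) : List Char → List Char
  | [] => []
  | x :: t =>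
    if x = '%' then
      match t with
      | [] => ['%']
      | y :: t' =>
        match pvAssoc D y with
        | some v => v ++ pvScan D t'
        | none => '%' :: pvScan D (y :: t')
    else x :: pvScan D t

def datetime_py2js_py_alt (datetime_format : String) : String :=
  String.ofList (pvScan pvConvDict datetime_format.toList)

-- ===== PRECONDITION & SPEC =====
-- On inputs containing the substring '%%m' or '%%y', A's later replace passes re-match the
-- '%M'/'%Y' an earlier pass just created (A '%%m' = "mmM", A '%%y' = "YYYYY"); B returns
-- "%MM"/"%YY", the intended token-by-token conversion.
def D_datetime_py2js_py (datetime_format : String) : Prop :=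
  PySem.Str.isIn "%%m" datetime_format = true ∨ PySem.Str.isIn "%%y" datetime_format = true
instance (datetime_format : String) : Decidable (D_datetime_py2js_py datetime_format) := by
  unfold D_datetime_py2js_py; infer_instance

def Spec_datetime_py2js_py (datetime_format : String) (out : String) : Prop :=
  ¬ D_datetime_py2js_py datetime_format → out = datetime_py2js_py_alt datetime_format
instance (datetime_format : String) (out : String) : Decidable (Spec_datetime_py2js_py datetime_format out) := by
  unfold Spec_datetime_py2js_py; infer_instance

def pvDiffWitness_datetime_py2js_py : String := "%%m"
def pvDiffWitnessOut_datetime_py2js_py : String × String := ("mmM", "%MM")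

-- ===== CLAIM (what is proved, stated in full; the proofs are below) =====
def Claim_unchanged_datetime_py2js_py : Prop := ∀ (datetime_format : String), Dom_datetime_py2js_py datetime_format → Spec_datetime_py2js_py datetime_format (datetime_py2js_py datetime_format)
def Claim_changed_datetime_py2js_py : Prop := Dom_datetime_py2js_py (pvDiffWitness_datetime_py2js_py) ∧ D_datetime_py2js_py (pvDiffWitness_datetime_py2js_py) ∧ datetime_py2js_py (pvDiffWitness_datetime_py2js_py) = pvDiffWitnessOut_datetime_py2js_py.1 ∧ datetime_py2js_py_alt (pvDiffWitness_datetime_py2js_py) = pvDiffWitnessOut_datetime_py2js_py.2 ∧ pvDiffWitnessOut_datetime_py2js_py.1 ≠ pvDiffWitnessOut_datetime_py2js_py.2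
def Claim_exact_datetime_py2js_py : Prop := ∀ (datetime_format : String), Dom_datetime_py2js_py datetime_format → D_datetime_py2js_py datetime_format → datetime_py2js_py datetime_format ≠ datetime_py2js_py_alt datetime_format

-- ===== LEMMAS AND PROOFS =====

-- naive structural single replace of the two-char token ['%', c] by r (what one .replace pass does)
def pvRep1 (c : Char) (r : List Char) : List Char → List Char
  | [] => []
  | [x] => [x]
  | x :: y :: t =>
    if x = '%' ∧ y = c then r ++ pvRep1 c r t
    else x :: pvRep1 c r (y :: t)

theorem pvRep1_cons_ne (c : Char) (r : List Char) {x : Char} (h : ¬ x = '%') (t : List Char) :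
    pvRep1 c r (x :: t) = x :: pvRep1 c r t := by
  cases t <;> simp [pvRep1, h]

theorem pvRep1_pct_match (c : Char) (r t : List Char) :
    pvRep1 c r ('%' :: c :: t) = r ++ pvRep1 c r t := by
  simp [pvRep1]

theorem pvRep1_pct_ne (c : Char) (r : List Char) {y : Char} (h : ¬ y = c) (t : List Char) :
    pvRep1 c r ('%' :: y :: t) = '%' :: pvRep1 c r (y :: t) := by
  simp [pvRep1, h]

theorem pvRep1_pct_head (c : Char) (r : List Char) {w : List Char} (h : w.head? ≠ some c) :
    pvRep1 c r ('%' :: w) = '%' :: pvRep1 c r w := by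
  cases w with
  | nil => simp [pvRep1]
  | cons y t =>
    have hy : ¬ y = c := by simpa using h
    exact pvRep1_pct_ne c r hy t

theorem pvRep1_append (c : Char) (r : List Char) {v : List Char}
    (hv : ∀ a ∈ v, ¬ a = '%') (w : List Char) :
    pvRep1 c r (v ++ w) = v ++ pvRep1 c r w := by
  induction v with
  | nil => simp
  | cons a v' ih =>
    rw [List.cons_append, pvRep1_cons_ne c r (hv a (by simp)) (v' ++ w),
      ih (fun a ha => hv a (by simp [ha]))]
    simp

theorem pvGo_eq (c : Char) (r : List Char) :
    ∀ (fuel : Nat) (l acc : List Char), l.length ≤ fuel →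
      PySem.Chars.replace.go ['%', c] r fuel l acc = acc.reverse ++ pvRep1 c r l := by
  intro fuel
  induction fuel with
  | zero =>
    intro l acc h
    have hl : l = [] := List.eq_nil_of_length_eq_zero (Nat.le_zero.mp h)
    subst hl
    simp [PySem.Chars.replace.go, pvRep1]
  | succ n ih =>
    intro l acc h
    cases l with
    | nil => simp [PySem.Chars.replace.go, pvRep1]
    | cons x t =>
      rw [PySem.Chars.replace.go]
      by_cases hpre : List.isPrefixOf ['%', c] (x :: t) = true
      · rcases List.isPrefixOf_iff_prefix.mp hpre with ⟨u, hu⟩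
        have hx : x = '%' := by simpa using congrArg (fun l => l.head?) hu.symm
        subst hx
        have ht : t = c :: u := by
          have := congrArg List.tail hu
          simpa using this.symm
        subst ht
        rw [if_pos hpre]
        have hlen : u.length ≤ n := by simp at h; omega
        rw [show List.drop (['%', c].length) ('%' :: c :: u) = u by simp]
        rw [ih u (r.reverse ++ acc) hlen]
        rw [pvRep1_pct_match]
        simp
      · rw [if_neg hpre]
        have hlen : t.length ≤ n := by simp at h; omega
        rw [ih t (x :: acc) hlen]
        have hrep : pvRep1 c r (x :: t) = x :: pvRep1 c r t := by
          by_cases hx : x = '%'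
          · subst hx
            cases t with
            | nil => simp [pvRep1]
            | cons y t' =>
              have hyc : ¬ y = c := by
                intro hy; subst hy
                exact hpre (List.isPrefixOf_iff_prefix.mpr ⟨t', rfl⟩)
              exact pvRep1_pct_ne c r hyc t'
          · exact pvRep1_cons_ne c r hx t
        rw [hrep]
        simp

theorem pvReplace_eq (c : Char) (r l : List Char) :
    PySem.Chars.replace l ['%', c] r = pvRep1 c r l := by
  rw [PySem.Chars.replace]
  simp only [List.isEmpty_cons, if_false, Bool.false_eq_true]
  simpa using pvGo_eq c r l.length l [] le_rfl

theorem pvScan_cons_ne (D : List (Char × List Char)) {x : Char} (h : ¬ x = '%') (t : List Char) :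
    pvScan D (x :: t) = x :: pvScan D t := by
  cases t <;> simp [pvScan, h]

theorem pvScan_pct_nil (D : List (Char × List Char)) : pvScan D ['%'] = ['%'] := by
  simp [pvScan]

theorem pvScan_pct_some (D : List (Char × List Char)) {y : Char} {v : List Char}
    (h : pvAssoc D y = some v) (t : List Char) :
    pvScan D ('%' :: y :: t) = v ++ pvScan D t := by
  simp [pvScan, h]

theorem pvScan_pct_none (D : List (Char × List Char)) {y : Char}
    (h : pvAssoc D y = none) (t : List Char) :
    pvScan D ('%' :: y :: t) = '%' :: pvScan D (y :: t) := by
  simp [pvScan, h]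

theorem pvAssoc_mem {D : List (Char × List Char)} {y : Char} {v : List Char}
    (h : pvAssoc D y = some v) : (y, v) ∈ D := by
  induction D with
  | nil => simp [pvAssoc] at h
  | cons p rest ih =>
    obtain ⟨k, w⟩ := p
    by_cases hy : y = k
    · subst hy
      simp [pvAssoc] at h
      simp [h]
    · simp [pvAssoc, hy] at h
      simp [ih h]

theorem pvAssoc_append_some {D : List (Char × List Char)} {y : Char} {v : List Char}
    (h : pvAssoc D y = some v) (F : List (Char × List Char)) :
    pvAssoc (D ++ F) y = some v := by
  induction D with
  | nil => simp [pvAssoc] at h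
  | cons p rest ih =>
    obtain ⟨k, w⟩ := p
    by_cases hy : y = k
    · subst hy
      simp [pvAssoc] at h ⊢
      exact h
    · simp [pvAssoc, hy] at h ⊢
      exact ih h

theorem pvAssoc_append_none {D : List (Char × List Char)} {y : Char}
    (h : pvAssoc D y = none) (F : List (Char × List Char)) :
    pvAssoc (D ++ F) y = pvAssoc F y := by
  induction D with
  | nil => simp
  | cons p rest ih =>
    obtain ⟨k, w⟩ := p
    by_cases hy : y = k
    · subst hy
      simp [pvAssoc] at h
    · simp only [List.cons_append, pvAssoc, if_neg hy] at h ⊢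
      exact ih h

-- the extended scan: exactly A's seven passes, with the two cascade channels made explicit.
-- E holds the three-char tokens '%%z' ↦ w that the sequential passes create.
def pvScanA (D E : List (Char × List Char)) : List Char → List Char
  | [] => []
  | x :: t =>
    if x = '%' then
      match t with
      | [] => ['%']
      | y :: t' =>
        if y = '%' then
          match t' with
          | [] => ['%', '%']
          | z :: t'' =>
            match pvAssoc E z with
            | some w => w ++ pvScanA D E t''
            | none => '%' :: pvScanA D E ('%' :: z :: t'')
        else
          match pvAssoc D y with
          | some v => v ++ pvScanA D E t'
          | none => '%' :: pvScanA D E (y :: t')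
    else x :: pvScanA D E t
termination_by l => l.length
decreasing_by all_goals simp only [List.length_cons]; omega

theorem pvScanA_nil (D E : List (Char × List Char)) : pvScanA D E [] = [] := by
  rw [pvScanA.eq_def]

theorem pvScanA_cons_ne (D E : List (Char × List Char)) {x : Char} (h : ¬ x = '%')
    (t : List Char) : pvScanA D E (x :: t) = x :: pvScanA D E t := by
  cases t <;> (rw [pvScanA.eq_def]; simp [h])

theorem pvScanA_pct_nil (D E : List (Char × List Char)) : pvScanA D E ['%'] = ['%'] := by
  rw [pvScanA.eq_def]; simp

theorem pvScanA_pctpct_nil (D E : List (Char × List Char)) :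
    pvScanA D E ['%', '%'] = ['%', '%'] := by
  rw [pvScanA.eq_def]; simp

theorem pvScanA_pct_some (D E : List (Char × List Char)) {y : Char} {v : List Char}
    (hy : ¬ y = '%') (h : pvAssoc D y = some v) (t : List Char) :
    pvScanA D E ('%' :: y :: t) = v ++ pvScanA D E t := by
  rw [pvScanA.eq_def]; simp [hy, h]

theorem pvScanA_pct_none (D E : List (Char × List Char)) {y : Char}
    (hy : ¬ y = '%') (h : pvAssoc D y = none) (t : List Char) :
    pvScanA D E ('%' :: y :: t) = '%' :: pvScanA D E (y :: t) := by
  rw [pvScanA.eq_def]; simp [hy, h]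

theorem pvScanA_ext_some (D E : List (Char × List Char)) {z : Char} {w : List Char}
    (h : pvAssoc E z = some w) (t : List Char) :
    pvScanA D E ('%' :: '%' :: z :: t) = w ++ pvScanA D E t := by
  rw [pvScanA.eq_def]; simp [h]

theorem pvScanA_ext_none (D E : List (Char × List Char)) {z : Char}
    (h : pvAssoc E z = none) (t : List Char) :
    pvScanA D E ('%' :: '%' :: z :: t) = '%' :: pvScanA D E ('%' :: z :: t) := by
  rw [pvScanA.eq_def]; simp [h]

theorem pvScanA_nil_dict (l : List Char) : pvScanA [] [] l = l := by
  induction l with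
  | nil => exact pvScanA_nil [] []
  | cons x t ih =>
    by_cases hx : x = '%'
    · subst hx
      cases t with
      | nil => exact pvScanA_pct_nil [] []
      | cons y t' =>
        by_cases hy : y = '%'
        · subst hy
          cases t' with
          | nil => exact pvScanA_pctpct_nil [] []
          | cons z t'' => rw [pvScanA_ext_none [] [] rfl t'', ih]
        · rw [pvScanA_pct_none [] [] hy rfl t', ih]
    · rw [pvScanA_cons_ne [] [] hx t, ih]

-- the head of the scan of a '%'-led suffix is never the pass character c
theorem pvScanA_pct_head_ne (c : Char) (D E : List (Char × List Char))
    (hc : ¬ c = '%')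
    (hDvals : ∀ p ∈ D, p.2 ≠ [])
    (hEvals : ∀ p ∈ E, p.2 ≠ [] ∧ p.2.head? ≠ some c)
    (u : List Char)
    (hu : ∀ z t v, u = z :: t → pvAssoc D z = some v → v.head? ≠ some c) :
    (pvScanA D E ('%' :: u)).head? ≠ some c := by
  cases u with
  | nil =>
    rw [pvScanA_pct_nil]
    intro hcontra
    simp only [List.head?_cons, Option.some.injEq] at hcontra
    exact hc hcontra.symm
  | cons z t'' =>
    by_cases hz : z = '%'
    · subst hz
      cases t'' with
      | nil =>
        rw [pvScanA_pctpct_nil]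
        intro hcontra
        simp only [List.head?_cons, Option.some.injEq] at hcontra
        exact hc hcontra.symm
      | cons z2 t3 =>
        cases hz2 : pvAssoc E z2 with
        | some w =>
          rw [pvScanA_ext_some D E hz2 t3]
          obtain ⟨hwne, hwh⟩ := hEvals (z2, w) (pvAssoc_mem hz2)
          rw [List.head?_append_of_ne_nil _ hwne]
          exact hwh
        | none =>
          rw [pvScanA_ext_none D E hz2 t3]
          intro hcontra
          simp only [List.head?_cons, Option.some.injEq] at hcontra
          exact hc hcontra.symm
    · cases hv : pvAssoc D z with
      | some v =>
        rw [pvScanA_pct_some D E hz hv t'']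
        have hvne : v ≠ [] := hDvals (z, v) (pvAssoc_mem hv)
        rw [List.head?_append_of_ne_nil _ hvne]
        exact hu z t'' v rfl hv
      | none =>
        rw [pvScanA_pct_none D E hz hv t'']
        intro hcontra
        simp only [List.head?_cons, Option.some.injEq] at hcontra
        exact hc hcontra.symm

-- one replace pass on the extended scan = the extended scan with the pass added (and its new
-- cascade tokens N appended to E)
theorem pvStepE (c : Char) (r : List Char) (D E N : List (Char × List Char))
    (hc : ¬ c = '%')
    (hDvals : ∀ p ∈ D, p.2 ≠ [] ∧ ∀ a ∈ p.2, ¬ a = '%')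
    (hDkeys : ∀ p ∈ D, ¬ p.1 = '%')
    (hEvals : ∀ p ∈ E, p.2 ≠ [] ∧ (∀ a ∈ p.2, ¬ a = '%') ∧ p.2.head? ≠ some c)
    (hnc : pvAssoc D c = none) (hEc : pvAssoc E c = none)
    (hN : ∀ z, pvAssoc N z =
      (pvAssoc D z).bind fun v => if v.head? = some c then some (r ++ v.tail) else none) :
    ∀ (n : Nat) (l : List Char), l.length ≤ n →
      pvRep1 c r (pvScanA D E l) = pvScanA (D ++ [(c, r)]) (E ++ N) l := by
  intro n
  induction n with
  | zero =>
    intro l h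
    have hl : l = [] := List.eq_nil_of_length_eq_zero (Nat.le_zero.mp h)
    subst hl
    simp [pvScanA_nil, pvRep1]
  | succ n ih =>
    intro l hlen
    cases l with
    | nil => simp [pvScanA_nil, pvRep1]
    | cons x t =>
      by_cases hx : x = '%'
      · subst hx
        cases t with
        | nil =>
          rw [pvScanA_pct_nil, pvScanA_pct_nil]
          simp [pvRep1]
        | cons y t' =>
          by_cases hy : y = '%'
          · subst hy
            cases t' with
            | nil =>
              rw [pvScanA_pctpct_nil, pvScanA_pctpct_nil]
              have h1 : ¬ ('%' = c) := fun h => hc h.symm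
              simp [pvRep1, h1]
            | cons z t'' =>
              cases hz : pvAssoc E z with
              | some w =>
                rw [pvScanA_ext_some D E hz t'']
                obtain ⟨hwne, hwp, hwh⟩ := hEvals (z, w) (pvAssoc_mem hz)
                rw [pvRep1_append c r hwp]
                rw [ih t'' (by simp only [List.length_cons] at hlen ⊢; omega)]
                rw [pvScanA_ext_some (D ++ [(c, r)]) (E ++ N) (pvAssoc_append_some hz N) t'']
              | none =>
                have hzD : ∀ v, pvAssoc D z = some v → v.head? = some c →
                    pvScanA D E ('%' :: '%' :: z :: t'') = '%' :: (v ++ pvScanA D E t'') := by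
                  intro v hv hvh
                  have hzp : ¬ z = '%' := hDkeys (z, v) (pvAssoc_mem hv)
                  rw [pvScanA_ext_none D E hz t'', pvScanA_pct_some D E hzp hv t'']
                cases hv : pvAssoc D z with
                | some v =>
                  by_cases hvh : v.head? = some c
                  · -- a cascade: the pass matches '%' + head of v
                    rw [hzD v hv hvh]
                    obtain ⟨hvne, hvp⟩ := hDvals (z, v) (pvAssoc_mem hv)
                    obtain ⟨v0, vt, rfl⟩ : ∃ v0 vt, v = v0 :: vt := by
                      cases v with
                      | nil => simp at hvh
                      | cons a b => exact ⟨a, b, rfl⟩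
                    have hv0 : v0 = c := by simpa using hvh
                    simp only [List.cons_append, hv0]
                    rw [pvRep1_pct_match]
                    rw [pvRep1_append c r (fun a ha => hvp a (List.mem_cons_of_mem v0 ha))]
                    rw [ih t'' (by simp only [List.length_cons] at hlen ⊢; omega)]
                    have hNz : pvAssoc (E ++ N) z = some (r ++ vt) := by
                      rw [pvAssoc_append_none hz N, hN z, hv]
                      simp [hvh]
                    rw [pvScanA_ext_some (D ++ [(c, r)]) (E ++ N) hNz t'']
                    simp
                  · -- no cascade here: pass the copied '%' through
                    rw [pvScanA_ext_none D E hz t'']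
                    have hhead : (pvScanA D E ('%' :: z :: t'')).head? ≠ some c := by
                      apply pvScanA_pct_head_ne c D E hc
                        (fun p hp => (hDvals p hp).1)
                        (fun p hp => ⟨(hEvals p hp).1, (hEvals p hp).2.2⟩)
                      intro z' t' v' hzt hv'
                      have hz' : z' = z := by
                        have h := congrArg (fun l => l.head?) hzt
                        simp only [List.head?_cons, Option.some.injEq] at h
                        exact h.symm
                      subst hz'
                      rw [hv] at hv'
                      cases hv'
                      exact hvh
                    rw [pvRep1_pct_head c r hhead]
                    rw [ih ('%' :: z :: t'') (by simp only [List.length_cons] at hlen ⊢; omega)]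
                    have hNz : pvAssoc (E ++ N) z = none := by
                      rw [pvAssoc_append_none hz N, hN z, hv]
                      simp [hvh]
                    rw [pvScanA_ext_none (D ++ [(c, r)]) (E ++ N) hNz t'']
                | none =>
                  rw [pvScanA_ext_none D E hz t'']
                  have hhead : (pvScanA D E ('%' :: z :: t'')).head? ≠ some c := by
                    apply pvScanA_pct_head_ne c D E hc
                      (fun p hp => (hDvals p hp).1)
                      (fun p hp => ⟨(hEvals p hp).1, (hEvals p hp).2.2⟩)
                    intro z' t' v' hzt hv'
                    have hz' : z' = z := by
                      have h := congrArg (fun l => l.head?) hzt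
                      simp only [List.head?_cons, Option.some.injEq] at h
                      exact h.symm
                    subst hz'
                    rw [hv] at hv'
                    cases hv'
                  rw [pvRep1_pct_head c r hhead]
                  rw [ih ('%' :: z :: t'') (by simp only [List.length_cons] at hlen ⊢; omega)]
                  have hNz : pvAssoc (E ++ N) z = none := by
                    rw [pvAssoc_append_none hz N, hN z, hv]
                    simp
                  rw [pvScanA_ext_none (D ++ [(c, r)]) (E ++ N) hNz t'']
          · -- y ≠ '%'
            cases hv : pvAssoc D y with
            | some v =>
              rw [pvScanA_pct_some D E hy hv t']
              obtain ⟨hvne, hvp⟩ := hDvals (y, v) (pvAssoc_mem hv)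
              rw [pvRep1_append c r hvp]
              rw [ih t' (by simp only [List.length_cons] at hlen ⊢; omega)]
              rw [pvScanA_pct_some (D ++ [(c, r)]) (E ++ N) hy
                (pvAssoc_append_some hv [(c, r)]) t']
            | none =>
              by_cases hyc : y = c
              · subst hyc
                rw [pvScanA_pct_none D E hy hv t', pvScanA_cons_ne D E hy t',
                  pvRep1_pct_match]
                rw [ih t' (by simp only [List.length_cons] at hlen ⊢; omega)]
                have ha : pvAssoc (D ++ [(y, r)]) y = some r := by
                  rw [pvAssoc_append_none hv [(y, r)]]
                  simp [pvAssoc]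
                rw [pvScanA_pct_some (D ++ [(y, r)]) (E ++ N) hy ha t']
              · rw [pvScanA_pct_none D E hy hv t']
                have hhead : (pvScanA D E (y :: t')).head? ≠ some c := by
                  rw [pvScanA_cons_ne D E hy t']
                  intro hcontra
                  simp only [List.head?_cons, Option.some.injEq] at hcontra
                  exact hyc hcontra
                rw [pvRep1_pct_head c r hhead]
                rw [ih (y :: t') (by simp only [List.length_cons] at hlen ⊢; omega)]
                have ha : pvAssoc (D ++ [(c, r)]) y = none := by
                  rw [pvAssoc_append_none hv [(c, r)]]
                  simp [pvAssoc, hyc]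
                rw [pvScanA_pct_none (D ++ [(c, r)]) (E ++ N) hy ha t']
      · rw [pvScanA_cons_ne D E hx t, pvRep1_cons_ne c r hx _,
          ih t (by simp only [List.length_cons] at hlen; omega),
          pvScanA_cons_ne (D ++ [(c, r)]) (E ++ N) hx t]

set_option maxRecDepth 8192

-- the seven concrete passes
theorem pvStep1 (l : List Char) :
    pvRep1 'd' ['D','D'] (pvScanA [] [] l) = pvScanA [('d', ['D','D'])] [] l := by
  simpa using pvStepE 'd' ['D','D'] [] [] [] (by decide) (by simp) (by simp) (by simp) rfl rfl
    (by intro z; simp [pvAssoc]) l.length l le_rfl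

theorem pvStep2 (l : List Char) :
    pvRep1 'm' ['M','M'] (pvScanA [('d', ['D','D'])] [] l) =
      pvScanA [('d', ['D','D']), ('m', ['M','M'])] [] l := by
  simpa using pvStepE 'm' ['M','M'] [('d', ['D','D'])] [] [] (by decide) (by simp) (by simp)
    (by simp) (by decide) rfl
    (by intro z; simp only [pvAssoc]; split_ifs <;> simp) l.length l le_rfl

theorem pvStep3 (l : List Char) :
    pvRep1 'y' ['Y','Y'] (pvScanA [('d', ['D','D']), ('m', ['M','M'])] [] l) =
      pvScanA [('d', ['D','D']), ('m', ['M','M']), ('y', ['Y','Y'])] [] l := by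
  simpa using pvStepE 'y' ['Y','Y'] [('d', ['D','D']), ('m', ['M','M'])] [] [] (by decide)
    (by simp) (by simp) (by simp) (by decide) rfl
    (by intro z; simp only [pvAssoc]; split_ifs <;> simp) l.length l le_rfl

theorem pvStep4 (l : List Char) :
    pvRep1 'Y' ['Y','Y','Y','Y']
        (pvScanA [('d', ['D','D']), ('m', ['M','M']), ('y', ['Y','Y'])] [] l) =
      pvScanA [('d', ['D','D']), ('m', ['M','M']), ('y', ['Y','Y']), ('Y', ['Y','Y','Y','Y'])]
        [('y', ['Y','Y','Y','Y','Y'])] l := by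
  simpa using pvStepE 'Y' ['Y','Y','Y','Y'] [('d', ['D','D']), ('m', ['M','M']), ('y', ['Y','Y'])]
    [] [('y', ['Y','Y','Y','Y','Y'])] (by decide) (by simp) (by simp) (by simp) (by decide) rfl
    (by intro z; simp only [pvAssoc]; split_ifs <;> simp_all) l.length l le_rfl

theorem pvStep5 (l : List Char) :
    pvRep1 'H' ['H','H']
        (pvScanA [('d', ['D','D']), ('m', ['M','M']), ('y', ['Y','Y']), ('Y', ['Y','Y','Y','Y'])]
          [('y', ['Y','Y','Y','Y','Y'])] l) =
      pvScanA [('d', ['D','D']), ('m', ['M','M']), ('y', ['Y','Y']), ('Y', ['Y','Y','Y','Y']),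
          ('H', ['H','H'])] [('y', ['Y','Y','Y','Y','Y'])] l := by
  simpa using pvStepE 'H' ['H','H']
    [('d', ['D','D']), ('m', ['M','M']), ('y', ['Y','Y']), ('Y', ['Y','Y','Y','Y'])]
    [('y', ['Y','Y','Y','Y','Y'])] [] (by decide) (by simp) (by simp) (by simp) (by decide)
    (by decide) (by intro z; simp only [pvAssoc]; split_ifs <;> simp) l.length l le_rfl

theorem pvStep6 (l : List Char) :
    pvRep1 'M' ['m','m']
        (pvScanA [('d', ['D','D']), ('m', ['M','M']), ('y', ['Y','Y']), ('Y', ['Y','Y','Y','Y']),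
          ('H', ['H','H'])] [('y', ['Y','Y','Y','Y','Y'])] l) =
      pvScanA [('d', ['D','D']), ('m', ['M','M']), ('y', ['Y','Y']), ('Y', ['Y','Y','Y','Y']),
          ('H', ['H','H']), ('M', ['m','m'])]
        [('y', ['Y','Y','Y','Y','Y']), ('m', ['m','m','M'])] l := by
  simpa using pvStepE 'M' ['m','m']
    [('d', ['D','D']), ('m', ['M','M']), ('y', ['Y','Y']), ('Y', ['Y','Y','Y','Y']), ('H', ['H','H'])]
    [('y', ['Y','Y','Y','Y','Y'])] [('m', ['m','m','M'])] (by decide) (by simp) (by simp)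
    (by simp) (by decide) (by decide)
    (by intro z; simp only [pvAssoc]; split_ifs <;> simp_all) l.length l le_rfl

theorem pvStep7 (l : List Char) :
    pvRep1 'S' ['s','s']
        (pvScanA [('d', ['D','D']), ('m', ['M','M']), ('y', ['Y','Y']), ('Y', ['Y','Y','Y','Y']),
          ('H', ['H','H']), ('M', ['m','m'])]
          [('y', ['Y','Y','Y','Y','Y']), ('m', ['m','m','M'])] l) =
      pvScanA pvConvDict [('y', ['Y','Y','Y','Y','Y']), ('m', ['m','m','M'])] l := by
  have := pvStepE 'S' ['s','s']
    [('d', ['D','D']), ('m', ['M','M']), ('y', ['Y','Y']), ('Y', ['Y','Y','Y','Y']),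
      ('H', ['H','H']), ('M', ['m','m'])]
    [('y', ['Y','Y','Y','Y','Y']), ('m', ['m','m','M'])] [] (by decide) (by simp) (by simp)
    (by simp) (by decide) (by decide)
    (by intro z; simp only [pvAssoc]; split_ifs <;> simp) l.length l le_rfl
  simpa [pvConvDict] using this

-- A's seven passes are exactly the extended scan, on EVERY input
theorem pvA_eq_scanA (s : String) :
    (datetime_py2js_py s).toList =
      pvScanA pvConvDict [('y', ['Y','Y','Y','Y','Y']), ('m', ['m','m','M'])] s.toList := by
  unfold datetime_py2js_py
  simp only [List.foldl, PySem.Str.toList_replace]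
  have ed : ("%d" : String).toList = ['%','d'] := by decide
  have eDD : ("DD" : String).toList = ['D','D'] := by decide
  have em2 : ("%m" : String).toList = ['%','m'] := by decide
  have eMM : ("MM" : String).toList = ['M','M'] := by decide
  have ey2 : ("%y" : String).toList = ['%','y'] := by decide
  have eYY : ("YY" : String).toList = ['Y','Y'] := by decide
  have eY2 : ("%Y" : String).toList = ['%','Y'] := by decide
  have eYYYY : ("YYYY" : String).toList = ['Y','Y','Y','Y'] := by decide
  have eH2 : ("%H" : String).toList = ['%','H'] := by decide
  have eHH : ("HH" : String).toList = ['H','H'] := by decide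
  have eM2 : ("%M" : String).toList = ['%','M'] := by decide
  have emm : ("mm" : String).toList = ['m','m'] := by decide
  have eS2 : ("%S" : String).toList = ['%','S'] := by decide
  have ess : ("ss" : String).toList = ['s','s'] := by decide
  rw [ed, eDD, em2, eMM, ey2, eYY, eY2, eYYYY, eH2, eHH, eM2, emm, eS2, ess]
  simp only [pvReplace_eq]
  conv_lhs => rw [← pvScanA_nil_dict s.toList]
  rw [pvStep1, pvStep2, pvStep3, pvStep4, pvStep5, pvStep6, pvStep7]

-- outside D_: the extended scan never fires a cascade token, so it is B's plain scan
theorem pvScanA_eq_scan :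
    ∀ (n : Nat) (l : List Char), l.length ≤ n →
      ¬ (['%','%','m'] <:+: l) → ¬ (['%','%','y'] <:+: l) →
      pvScanA pvConvDict [('y', ['Y','Y','Y','Y','Y']), ('m', ['m','m','M'])] l =
        pvScan pvConvDict l := by
  intro n
  induction n with
  | zero =>
    intro l h _ _
    have hl : l = [] := List.eq_nil_of_length_eq_zero (Nat.le_zero.mp h)
    subst hl
    simp [pvScanA_nil, pvScan]
  | succ n ih =>
    intro l hlen h1 h2
    cases l with
    | nil => simp [pvScanA_nil, pvScan]
    | cons x t =>
      have hsub : ∀ (p : List Char) (a : Char) (l' : List Char),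
          ¬ p <:+: (a :: l') → ¬ p <:+: l' :=
        fun p a l' hp hinf => hp (List.infix_cons hinf)
      by_cases hx : x = '%'
      · subst hx
        cases t with
        | nil => rw [pvScanA_pct_nil, pvScan_pct_nil]
        | cons y t' =>
          by_cases hy : y = '%'
          · subst hy
            cases t' with
            | nil =>
              rw [pvScanA_pctpct_nil,
                pvScan_pct_none pvConvDict (by decide : pvAssoc pvConvDict '%' = none) [],
                pvScan_pct_nil]
            | cons z t'' =>
              have hzE : pvAssoc [('y', ['Y','Y','Y','Y','Y']), ('m', ['m','m','M'])] z = none := by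
                have hzm : ¬ z = 'm' := by
                  intro hz; subst hz
                  exact h1 ⟨[], t'', by simp⟩
                have hzy : ¬ z = 'y' := by
                  intro hz; subst hz
                  exact h2 ⟨[], t'', by simp⟩
                simp [pvAssoc, hzm, hzy]
              rw [pvScanA_ext_none _ _ hzE t'']
              have hD : pvAssoc pvConvDict '%' = none := by decide
              rw [pvScan_pct_none pvConvDict hD (z :: t'')]
              rw [ih ('%' :: z :: t'') (by simp only [List.length_cons] at hlen ⊢; omega)
                (hsub _ _ _ h1) (hsub _ _ _ h2)]
          · cases hv : pvAssoc pvConvDict y with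
            | some v =>
              rw [pvScanA_pct_some _ _ hy hv t', pvScan_pct_some pvConvDict hv t',
                ih t' (by simp only [List.length_cons] at hlen ⊢; omega)
                  (hsub _ _ _ (hsub _ _ _ h1)) (hsub _ _ _ (hsub _ _ _ h2))]
            | none =>
              rw [pvScanA_pct_none _ _ hy hv t', pvScan_pct_none pvConvDict hv t',
                ih (y :: t') (by simp only [List.length_cons] at hlen ⊢; omega)
                  (hsub _ _ _ h1) (hsub _ _ _ h2)]
      · rw [pvScanA_cons_ne _ _ hx t, pvScan_cons_ne _ hx t,
          ih t (by simp only [List.length_cons] at hlen; omega) (hsub _ _ _ h1) (hsub _ _ _ h2)]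

-- inside D_: at the first cascade token the two scans emit different heads, so they differ
theorem pvScanA_ne_scan :
    ∀ (n : Nat) (l : List Char), l.length ≤ n →
      (['%','%','m'] <:+: l ∨ ['%','%','y'] <:+: l) →
      pvScanA pvConvDict [('y', ['Y','Y','Y','Y','Y']), ('m', ['m','m','M'])] l ≠
        pvScan pvConvDict l := by
  intro n
  induction n with
  | zero =>
    intro l h hinf
    have hl : l = [] := List.eq_nil_of_length_eq_zero (Nat.le_zero.mp h)
    subst hl
    rcases hinf with hinf | hinf <;> exact absurd hinf.length_le (by decide)
  | succ n ih =>
    intro l hlen hinf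
    -- peel one position of the pattern: either it is a prefix or it lies in the tail
    cases l with
    | nil =>
      rcases hinf with hinf | hinf <;> exact absurd hinf.length_le (by decide)
    | cons x t =>
      have hstep : ∀ (p : List Char), p <:+: (x :: t) → ¬ p <+: (x :: t) → p <:+: t := by
        intro p hp hnpre
        rcases List.infix_cons_iff.mp hp with h | h
        · exact absurd h hnpre
        · exact h
      by_cases hpre : (['%','%','m'] <+: (x :: t)) ∨ (['%','%','y'] <+: (x :: t))
      · -- a cascade token right here: the heads of the two outputs differ
        rcases hpre with hpre | hpre
        · obtain ⟨u, hu⟩ := hpre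
          rw [← hu]
          simp only [List.cons_append, List.nil_append]
          have hE : pvAssoc [('y', ['Y','Y','Y','Y','Y']), ('m', ['m','m','M'])] 'm' =
              some ['m','m','M'] := by decide
          rw [pvScanA_ext_some _ _ hE u,
            pvScan_pct_none pvConvDict (by decide : pvAssoc pvConvDict '%' = none) ('m' :: u)]
          intro heq
          have := congrArg List.head? heq
          simp at this
        · obtain ⟨u, hu⟩ := hpre
          rw [← hu]
          simp only [List.cons_append, List.nil_append]
          have hE : pvAssoc [('y', ['Y','Y','Y','Y','Y']), ('m', ['m','m','M'])] 'y' =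
              some ['Y','Y','Y','Y','Y'] := by decide
          rw [pvScanA_ext_some _ _ hE u,
            pvScan_pct_none pvConvDict (by decide : pvAssoc pvConvDict '%' = none) ('y' :: u)]
          intro heq
          have := congrArg List.head? heq
          simp at this
      · rw [not_or] at hpre
        obtain ⟨hp1, hp2⟩ := hpre
        have hinf' : ['%','%','m'] <:+: t ∨ ['%','%','y'] <:+: t := by
          rcases hinf with h | h
          · exact Or.inl (hstep _ h hp1)
          · exact Or.inr (hstep _ h hp2)
        have hlen' : t.length ≤ n := by simp only [List.length_cons] at hlen; omega
        have ihne := ih t hlen' hinf'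
        by_cases hx : x = '%'
        · subst hx
          cases t with
          | nil =>
            rcases hinf' with h | h <;> exact absurd h.length_le (by decide)
          | cons y t' =>
            by_cases hy : y = '%'
            · subst hy
              cases t' with
              | nil =>
                rcases hinf' with h | h <;> exact absurd h.length_le (by decide)
              | cons z t'' =>
                have hzm : ¬ z = 'm' := by
                  intro hz; subst hz; exact hp1 ⟨t'', by simp⟩
                have hzy : ¬ z = 'y' := by
                  intro hz; subst hz; exact hp2 ⟨t'', by simp⟩
                have hzE : pvAssoc [('y', ['Y','Y','Y','Y','Y']), ('m', ['m','m','M'])] z = none := by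
                  simp [pvAssoc, hzm, hzy]
                rw [pvScanA_ext_none _ _ hzE t'',
                  pvScan_pct_none pvConvDict (by decide : pvAssoc pvConvDict '%' = none) (z :: t'')]
                intro heq
                exact ihne (by simpa using congrArg List.tail heq)
            · cases hv : pvAssoc pvConvDict y with
              | some v =>
                rw [pvScanA_pct_some _ _ hy hv t', pvScan_pct_some pvConvDict hv t']
                have hdeny : ∀ (k : Char), ¬ ('%' :: '%' :: k :: []) <+: (y :: t') := by
                  intro k hk
                  obtain ⟨u, hu⟩ := hk
                  have h0 := congrArg List.head? hu
                  simp only [List.cons_append, List.head?_cons, Option.some.injEq] at h0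
                  exact hy h0.symm
                have hinf'' : ['%','%','m'] <:+: t' ∨ ['%','%','y'] <:+: t' := by
                  rcases hinf' with h | h
                  · exact Or.inl (by
                      rcases List.infix_cons_iff.mp h with h' | h'
                      · exact absurd h' (hdeny 'm')
                      · exact h')
                  · exact Or.inr (by
                      rcases List.infix_cons_iff.mp h with h' | h'
                      · exact absurd h' (hdeny 'y')
                      · exact h')
                intro heq
                have hl' : t'.length ≤ n := by simp only [List.length_cons] at hlen; omega
                exact ih t' hl' hinf'' (List.append_cancel_left heq)
              | none =>
                rw [pvScanA_pct_none _ _ hy hv t', pvScan_pct_none pvConvDict hv t']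
                intro heq
                exact ihne (by simpa using congrArg List.tail heq)
        · rw [pvScanA_cons_ne _ _ hx t, pvScan_cons_ne _ hx t]
          intro heq
          exact ihne (by simpa using congrArg List.tail heq)

-- ===== VERDICT (by name: the statement is the Claim_ definition above) =====
theorem datetime_py2js_py_spec : Claim_unchanged_datetime_py2js_py := by
  intro s _
  unfold Spec_datetime_py2js_py
  intro hnd
  have em : ("%%m" : String).toList = ['%','%','m'] := by decide
  have ey : ("%%y" : String).toList = ['%','%','y'] := by decide
  have h1 : ¬ (['%','%','m'] <:+: s.toList) := by
    intro hinf
    exact hnd (Or.inl (by rw [PySem.Str.isIn_iff_infix, em]; exact hinf))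
  have h2 : ¬ (['%','%','y'] <:+: s.toList) := by
    intro hinf
    exact hnd (Or.inr (by rw [PySem.Str.isIn_iff_infix, ey]; exact hinf))
  apply String.toList_inj.mp
  rw [pvA_eq_scanA s]
  unfold datetime_py2js_py_alt
  rw [String.toList_ofList]
  exact pvScanA_eq_scan s.toList.length s.toList le_rfl h1 h2

theorem datetime_py2js_py_changed : Claim_changed_datetime_py2js_py := by
  unfold Claim_changed_datetime_py2js_py; decide

theorem datetime_py2js_py_tight : Claim_exact_datetime_py2js_py := by
  intro s _ hd
  have em : ("%%m" : String).toList = ['%','%','m'] := by decide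
  have ey : ("%%y" : String).toList = ['%','%','y'] := by decide
  have hinf : ['%','%','m'] <:+: s.toList ∨ ['%','%','y'] <:+: s.toList := by
    rcases hd with h | h
    · exact Or.inl (by rw [PySem.Str.isIn_iff_infix, em] at h; exact h)
    · exact Or.inr (by rw [PySem.Str.isIn_iff_infix, ey] at h; exact h)
  intro heq
  have htl := congrArg String.toList heq
  rw [pvA_eq_scanA s] at htl
  unfold datetime_py2js_py_alt at htl
  rw [String.toList_ofList] at htl
  exact pvScanA_ne_scan s.toList.length s.toList le_rfl hinf htl
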